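-- pv_equiv track=rewrite | github.com/scientihark/tensorCaptcha | captchaType2/img.py | trim_counters
-- ===== SOURCE A (Python) =====
-- def sortByArea(elem):
--     return elem[1]
--
-- def sortByIndex(elem):
--     return elem[0]
--
-- def trim_counters(letter_boxs,maxLength):
--     if len(letter_boxs) <= maxLength :
--         return letter_boxs
--
--     tmp_letter_boxs = []
--     tmp_letter_boxs2 = []
--     new_letter_boxs = []
--     index = 0
--
--     for letter_box in letter_boxs:
--         w = letter_box[1][0] - letter_box[0][0] # width
--         h = letter_box[1][1] - letter_box[0][1] # height
--         area = w*h
--         tmp_letter_boxs.append([index,area])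
--         index += 1
--
--     tmp_letter_boxs.sort(key=sortByArea,reverse=True)
--
--     for num in range(0,maxLength):
--         tmp_letter_boxs2.append(tmp_letter_boxs[num])
--
--     tmp_letter_boxs2.sort(key=sortByIndex)
--
--     for letter_box in tmp_letter_boxs2:
--         new_letter_boxs.append(letter_boxs[letter_box[0]])
--
--     return new_letter_boxs
-- ===== SOURCE B (Python) =====
-- def trim_counters(letter_boxs, maxLength):
--     if len(letter_boxs) <= maxLength:
--         return letter_boxs
--
--     # online top-k: 'best' holds at most maxLength [index, area] pairs,
--     # ordered by area descending, ties keeping the earlier index first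
--     best = []
--     for i, box in enumerate(letter_boxs):
--         area = (box[1][0] - box[0][0]) * (box[1][1] - box[0][1])
--         pos = 0
--         while pos < len(best) and best[pos][1] >= area:
--             pos += 1
--         best.insert(pos, [i, area])
--         if len(best) > maxLength:
--             best.pop()
--
--     return [letter_boxs[p[0]] for p in sorted(best, key=lambda p: p[0])]
-- ===== Notes on version B (the rewrite author's own statement) =====
-- stated objective: alternative
-- what changed: Instead of building all [index,area] pairs, fully sorting them by area and slicing the first maxLength, B makes one pass that maintains a bounded best-k list (insert each box's pair in area-descending order, drop the smallest when the list exceeds maxLength), then emits the kept boxes in index order.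
import Mathlib
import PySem

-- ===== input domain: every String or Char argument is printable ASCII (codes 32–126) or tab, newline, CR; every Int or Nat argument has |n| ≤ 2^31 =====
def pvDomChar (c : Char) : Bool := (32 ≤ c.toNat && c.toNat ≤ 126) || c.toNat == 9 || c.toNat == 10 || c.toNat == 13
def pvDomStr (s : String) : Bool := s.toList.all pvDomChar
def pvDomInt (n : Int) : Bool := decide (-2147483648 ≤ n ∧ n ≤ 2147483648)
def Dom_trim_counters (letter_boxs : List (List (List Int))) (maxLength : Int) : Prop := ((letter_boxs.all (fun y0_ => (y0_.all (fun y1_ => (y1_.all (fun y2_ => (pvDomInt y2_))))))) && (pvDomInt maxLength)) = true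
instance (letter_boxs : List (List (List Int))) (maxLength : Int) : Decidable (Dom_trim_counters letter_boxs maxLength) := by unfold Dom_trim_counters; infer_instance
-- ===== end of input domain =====

-- A sorts all [index, area] pairs by area and slices; B keeps a bounded best-k list in one
-- pass (objective: alternative algorithm, no full sort). Equivalence is about the return value.

-- shared area expression: (box[1][0]-box[0][0])*(box[1][1]-box[0][1]), exact where the Python indexing succeeds
def pvArea (box : List (List Int)) : Int :=
  (PySem.List.pyGetD (PySem.List.pyGetD box 1 []) 0 0 - PySem.List.pyGetD (PySem.List.pyGetD box 0 []) 0 0) *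
  (PySem.List.pyGetD (PySem.List.pyGetD box 1 []) 1 0 - PySem.List.pyGetD (PySem.List.pyGetD box 0 []) 1 0)

-- ===== PORT A =====
def trim_counters (letter_boxs : List (List (List Int))) (maxLength : Int) : List (List (List Int)) :=
  if PySem.List.len letter_boxs ≤ maxLength then letter_boxs
  else
    -- for letter_box in letter_boxs: append [index, area]; index += 1
    let tmp := (letter_boxs.foldl
      (fun (st : List (Int × Int) × Int) letter_box =>
        (st.1 ++ [(st.2, pvArea letter_box)], st.2 + 1)) ([], 0)).1
    -- tmp.sort(key=sortByArea, reverse=True)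
    let tmpS := PySem.List.sorted tmp (fun e => e.2) true
    -- for num in range(0, maxLength): tmp2.append(tmpS[num])
    let tmp2 := (PySem.List.pyRange 0 maxLength).foldl
      (fun acc num => acc ++ [PySem.List.pyGetD tmpS num (0, 0)]) []
    -- tmp2.sort(key=sortByIndex)
    let tmp2S := PySem.List.sorted tmp2 (fun e => e.1) false
    -- for letter_box in tmp2S: new.append(letter_boxs[letter_box[0]])
    tmp2S.foldl (fun acc p => acc ++ [PySem.List.pyGetD letter_boxs p.1 []]) []

-- ===== PORT B =====
-- port of Source B's while/insert pair: insert x before the first entry whose area is smaller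
def pvInsertDesc (x : Int × Int) : List (Int × Int) → List (Int × Int)
  | [] => [x]
  | y :: ys => if y.2 < x.2 then x :: y :: ys else y :: pvInsertDesc x ys

def trim_counters_alt (letter_boxs : List (List (List Int))) (maxLength : Int) : List (List (List Int)) :=
  if PySem.List.len letter_boxs ≤ maxLength then letter_boxs
  else
    let best := (PySem.List.enumerate letter_boxs).foldl
      (fun best p =>
        let best' := pvInsertDesc (p.1, pvArea p.2) best
        if maxLength < PySem.List.len best' then best'.dropLast else best') []
    (PySem.List.sorted best (fun q => q.1) false).foldl
      (fun acc q => acc ++ [PySem.List.pyGetD letter_boxs q.1 []]) []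

-- ===== PRECONDITION & SPEC =====
-- Pre_ excludes exactly the inputs where Python A raises IndexError: when trimming happens,
-- every box must have at least two points with at least two coordinates each.
def Pre_trim_counters (letter_boxs : List (List (List Int))) (maxLength : Int) : Prop :=
  PySem.List.len letter_boxs ≤ maxLength ∨
    ∀ b ∈ letter_boxs, 2 ≤ b.length ∧ 2 ≤ (b.getD 0 []).length ∧ 2 ≤ (b.getD 1 []).length
instance (letter_boxs : List (List (List Int))) (maxLength : Int) : Decidable (Pre_trim_counters letter_boxs maxLength) := by unfold Pre_trim_counters; infer_instance

def pvWitness_trim_counters : List (List (List Int)) × Int :=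
  ([[[0, 0], [2, 3]], [[1, 1], [2, 2]], [[0, 0], [5, 5]]], 2)

def Spec_trim_counters (letter_boxs : List (List (List Int))) (maxLength : Int) (out : List (List (List Int))) : Prop := out = trim_counters_alt letter_boxs maxLength
instance (letter_boxs : List (List (List Int))) (maxLength : Int) (out : List (List (List Int))) : Decidable (Spec_trim_counters letter_boxs maxLength out) := by unfold Spec_trim_counters; infer_instance

-- ===== CLAIM (what is proved, stated in full; the proofs are below) =====
def Claim_equal_trim_counters : Prop := ∀ (letter_boxs : List (List (List Int))) (maxLength : Int), Dom_trim_counters letter_boxs maxLength → Pre_trim_counters letter_boxs maxLength → Spec_trim_counters letter_boxs maxLength (trim_counters letter_boxs maxLength)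

-- ===== LEMMAS AND PROOFS =====

theorem pvInsertDesc_eq_insertBy (x : Int × Int) (l : List (Int × Int)) :
    pvInsertDesc x l = PySem.List.insertBy (fun a b => decide (b.2 < a.2)) x l := by
  induction l with
  | nil => rfl
  | cons y ys ih => simp only [pvInsertDesc, PySem.List.insertBy, ih]; split <;> simp_all

theorem length_pvInsertDesc (x : Int × Int) (l : List (Int × Int)) :
    (pvInsertDesc x l).length = l.length + 1 := by
  induction l with
  | nil => rfl
  | cons y ys ih => simp only [pvInsertDesc]; split <;> simp [ih]

-- take k of an insert only depends on the first k elements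
theorem take_insert_take (k : Nat) (x : Int × Int) (l : List (Int × Int)) :
    List.take k (pvInsertDesc x l) = List.take k (pvInsertDesc x (List.take k l)) := by
  induction l generalizing k with
  | nil => simp
  | cons y ys ih =>
    cases k with
    | zero => simp
    | succ k' =>
      simp only [pvInsertDesc, List.take_succ_cons]
      split
      · cases k' with
        | zero => simp
        | succ j => simp [List.take_succ_cons, List.take_take]
      · simp only [List.take_succ_cons]
        rw [ih k']

-- the truncation step equals take k, for lists of length ≤ k+1
theorem trunc_eq_take (k : Nat) (m : List (Int × Int)) (h : m.length ≤ k + 1) :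
    (if k < m.length then m.dropLast else m) = List.take k m := by
  split
  · have hlen : m.length = k + 1 := by omega
    rw [List.dropLast_eq_take, hlen]; simp
  · rw [List.take_of_length_le (by omega)]

-- B's truncated fold computes take k of the full insertion fold
theorem foldl_trunc_eq_take (k : Nat) (l : List (Int × Int)) (s : List (Int × Int)) :
    l.foldl (fun best q =>
        let b' := pvInsertDesc q best
        if k < b'.length then b'.dropLast else b') (List.take k s)
      = List.take k (l.foldl (fun acc x => pvInsertDesc x acc) s) := by
  induction l generalizing s with
  | nil => simp
  | cons q l ih =>
    simp only [List.foldl_cons]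
    have h1 : (pvInsertDesc q (List.take k s)).length ≤ k + 1 := by
      simp [length_pvInsertDesc]
    rw [trunc_eq_take k _ h1, ← take_insert_take, ih]

-- the Int-guarded truncation in the port equals the Nat-guarded one (the list is nonempty)
theorem int_trunc_eq_nat_trunc (m : Int) (b' : List (Int × Int)) (hne : b' ≠ []) :
    (if m < PySem.List.len b' then b'.dropLast else b')
      = (if m.toNat < b'.length then b'.dropLast else b') := by
  have hlen : 0 < b'.length := List.length_pos_iff.mpr hne
  simp only [PySem.List.len]
  by_cases h2 : m.toNat < b'.length
  · have h1 : m < (b'.length : Int) := by omega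
    simp [h1, h2]
  · have h1 : ¬ m < (b'.length : Int) := by omega
    simp [h1, h2]

-- A's index/area pair-building loop
def pvPairs (lb : List (List (List Int))) (i : Int) : List (Int × Int) :=
  match lb with
  | [] => []
  | b :: bs => (i, pvArea b) :: pvPairs bs (i + 1)

theorem foldl_pairs (lb : List (List (List Int))) (acc : List (Int × Int)) (i : Int) :
    (lb.foldl (fun (st : List (Int × Int) × Int) letter_box =>
        (st.1 ++ [(st.2, pvArea letter_box)], st.2 + 1)) (acc, i)).1
      = acc ++ pvPairs lb i := by
  induction lb generalizing acc i with
  | nil => simp [pvPairs]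
  | cons b bs ih => simp [pvPairs, ih]

theorem enumerate_cons (b : List (List Int)) (bs : List (List (List Int))) (i : Int) :
    PySem.List.enumerate (b :: bs) i = (i, b) :: PySem.List.enumerate bs (i + 1) := by
  simp only [PySem.List.enumerate_eq_zipIdx_map, List.zipIdx_cons, List.map_cons, Nat.cast_zero,
    add_zero, List.zipIdx_succ, List.map_map]
  refine congrArg₂ _ rfl (List.map_congr_left fun p hp => ?_)
  simp [Function.comp]; ring

theorem enumerate_map_pairs (lb : List (List (List Int))) (i : Int) :
    (PySem.List.enumerate lb i).map (fun p => (p.1, pvArea p.2)) = pvPairs lb i := by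
  induction lb generalizing i with
  | nil => simp [PySem.List.enumerate_eq_zipIdx_map, pvPairs]
  | cons b bs ih => rw [enumerate_cons]; simp only [List.map_cons, pvPairs, ih]

theorem length_pvPairs (lb : List (List (List Int))) (i : Int) :
    (pvPairs lb i).length = lb.length := by
  induction lb generalizing i with
  | nil => rfl
  | cons b bs ih => simp [pvPairs, ih]

theorem pvInsertDesc_ne_nil (x : Int × Int) (l : List (Int × Int)) : pvInsertDesc x l ≠ [] := by
  cases l with
  | nil => simp [pvInsertDesc]
  | cons y ys => simp only [pvInsertDesc]; split <;> simp

theorem pyRange_zero_eq_map_range (m : Int) :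
    PySem.List.pyRange 0 m = (List.range m.toNat).map (Nat.cast : Nat → Int) := by
  unfold PySem.List.pyRange
  by_cases h : (0 : Int) < m
  · have h1 : ((m - 0 + 1 - 1) / 1).toNat = m.toNat := by
      have : m - 0 + 1 - 1 = m := by ring
      rw [this, Int.ediv_one]
    simp [h]
  · have h0 : m.toNat = 0 := by omega
    simp [h, h0]

theorem map_range_getD_eq_take {α : Type} (xs : List α) (d : α) (k : Nat) (h : k ≤ xs.length) :
    (List.range k).map (fun j => xs.getD j d) = xs.take k := by
  induction k with
  | zero => simp
  | succ k' ih =>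
    rw [List.range_succ, List.map_append, ih (by omega), List.take_add_one]
    have hk : k' < xs.length := by omega
    simp [List.getD, hk]

-- ===== VERDICT (by name: the statement is the Claim_ definition above) =====
theorem trim_counters_spec : Claim_equal_trim_counters := by
  intro lb m _ _
  unfold Spec_trim_counters trim_counters trim_counters_alt
  by_cases hle : PySem.List.len lb ≤ m
  · rw [if_pos hle, if_pos hle]
  · simp only [if_neg hle]
    -- both pair lists are pvPairs lb 0
    rw [foldl_pairs lb [] 0, List.nil_append]
    have hbody : ∀ (best : List (Int × Int)) (p : Int × List (List Int)),
        (fun best p =>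
          let b' := pvInsertDesc (p.1, pvArea p.2) best
          if m < PySem.List.len b' then b'.dropLast else b') best p
        = (fun best q =>
          let b' := pvInsertDesc q best
          if m.toNat < b'.length then b'.dropLast else b') best (p.1, pvArea p.2) := by
      intro best p
      simp only
      exact int_trunc_eq_nat_trunc m _ (pvInsertDesc_ne_nil _ _)
    -- B's fold over enumerate = truncated fold over pvPairs
    have hB : (PySem.List.enumerate lb).foldl
        (fun best p =>
          let b' := pvInsertDesc (p.1, pvArea p.2) best
          if m < PySem.List.len b' then b'.dropLast else b') []
        = (pvPairs lb 0).foldl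
        (fun best q =>
          let b' := pvInsertDesc q best
          if m.toNat < b'.length then b'.dropLast else b') [] := by
      rw [← enumerate_map_pairs lb 0, List.foldl_map]
      exact PySem.List.foldl_congr_mem _ _ _ _ (fun best p _ => hbody best p)
    rw [hB]
    have hbest : (pvPairs lb 0).foldl
        (fun best q =>
          let b' := pvInsertDesc q best
          if m.toNat < b'.length then b'.dropLast else b') []
        = List.take m.toNat (PySem.List.sorted (pvPairs lb 0) (fun e => e.2) true) := by
      have := foldl_trunc_eq_take m.toNat (pvPairs lb 0) []
      simp only [List.take_nil] at this
      rw [this, PySem.List.sorted_rev_eq_foldl_insertBy]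
      congr 1
      exact PySem.List.foldl_congr_mem _ _ _ _ (fun acc x _ => pvInsertDesc_eq_insertBy x acc)
    rw [hbest]
    -- A's tmp2 = take m.toNat of the sorted list
    have hlenpairs : (pvPairs lb 0).length = lb.length := length_pvPairs lb 0
    have htmp2 : (PySem.List.pyRange 0 m).foldl
        (fun acc num => acc ++ [PySem.List.pyGetD (PySem.List.sorted (pvPairs lb 0) (fun e => e.2) true) num (0, 0)]) []
        = List.take m.toNat (PySem.List.sorted (pvPairs lb 0) (fun e => e.2) true) := by
      rw [PySem.List.foldl_append_singleton_eq_map, List.nil_append,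
          pyRange_zero_eq_map_range, List.map_map]
      have hlen : m.toNat ≤ (PySem.List.sorted (pvPairs lb 0) (fun e => e.2) true).length := by
        rw [PySem.List.length_sorted, hlenpairs]
        simp [PySem.List.len] at hle; omega
      rw [← map_range_getD_eq_take _ (0,0) m.toNat hlen]
      refine List.map_congr_left fun j hj => ?_
      simp only [Function.comp, PySem.List.pyGetD_natCast]
    rw [htmp2]
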